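-- pv_equiv track=rewrite | github.com/konrad-daniel-sanchez/programacion-competitiva | codeforces/C. Find and Replace.py | solve
-- ===== SOURCE A (Python) =====
-- def solve(s):
--     d = {}
--     for i, e in enumerate(s):
--         if e not in d:
--             d[e] = i % 2
--         elif d[e] != i % 2:
--             return 'NO'
--     return 'YES'
-- ===== SOURCE B (Python) =====
-- def solve(s):
--     evens = {c for i, c in enumerate(s) if i % 2 == 0}
--     odds = {c for i, c in enumerate(s) if i % 2 == 1}
--     return 'NO' if evens & odds else 'YES'
-- ===== Notes on version B (the rewrite author's own statement) =====
-- stated objective: simpler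
-- what changed: Replaces the char-to-first-seen-parity dict with per-character early exit by two parity-partitioned character sets built in full passes and a single final set-intersection test.
import Mathlib
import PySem

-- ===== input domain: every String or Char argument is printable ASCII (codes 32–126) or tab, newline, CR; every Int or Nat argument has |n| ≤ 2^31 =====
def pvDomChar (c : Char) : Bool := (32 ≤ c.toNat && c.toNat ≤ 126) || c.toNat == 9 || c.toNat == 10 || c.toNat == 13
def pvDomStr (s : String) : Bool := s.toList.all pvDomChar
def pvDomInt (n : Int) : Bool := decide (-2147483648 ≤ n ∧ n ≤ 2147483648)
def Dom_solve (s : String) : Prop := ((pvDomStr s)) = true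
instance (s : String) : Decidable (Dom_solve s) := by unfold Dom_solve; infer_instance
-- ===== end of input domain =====

-- B replaces A's first-seen-parity dict with early exit by two parity-partitioned
-- character sets and one final intersection test (objective: simpler).

-- ===== PORT A =====
def solveLoop (l : List (Int × Char)) (d : PySem.Dict Char Int) : String :=
  match l with
  | [] => "YES"
  | (i, e) :: rest =>
    match d.get? e with
    | none => solveLoop rest (d.insert e (PySem.Int.mod i 2))
    | some v => if v ≠ PySem.Int.mod i 2 then "NO" else solveLoop rest d

def solve (s : String) : String :=
  solveLoop (PySem.List.enumerate s.toList 0) PySem.Dict.empty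

-- ===== PORT B =====
def evensOf (s : String) : PySem.Set Char :=
  PySem.Set.ofList
    (((PySem.List.enumerate s.toList 0).filter (fun p => PySem.Int.mod p.1 2 == 0)).map (·.2))

def oddsOf (s : String) : PySem.Set Char :=
  PySem.Set.ofList
    (((PySem.List.enumerate s.toList 0).filter (fun p => PySem.Int.mod p.1 2 == 1)).map (·.2))

def solve_alt (s : String) : String :=
  if PySem.Set.inter (evensOf s) (oddsOf s) = [] then "YES" else "NO"

-- ===== PRECONDITION & SPEC =====
def Spec_solve (s : String) (out : String) : Prop := out = solve_alt s
instance (s : String) (out : String) : Decidable (Spec_solve s out) := by unfold Spec_solve; infer_instance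

-- ===== CLAIM (what is proved, stated in full; the proofs are below) =====
def Claim_equal_solve : Prop := ∀ (s : String), Dom_solve s → Spec_solve s (solve s)

-- ===== LEMMAS AND PROOFS =====

-- characters of cs at absolute positions (counting from start index n) of parity r
def ev (r : Nat) : Nat → List Char → List Char
  | _, [] => []
  | n, c :: cs => if n % 2 = r then c :: ev r (n + 1) cs else ev r (n + 1) cs

theorem filt_eq_ev (r : Nat) (cs : List Char) : ∀ n : Nat,
    ((PySem.List.enumerate cs (n : Int)).filter
        (fun p => PySem.Int.mod p.1 2 == (r : Int))).map (·.2) = ev r n cs := by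
  induction cs with
  | nil => intro n; simp [PySem.List.enumerate_nil, ev]
  | cons c cs ih =>
    intro n
    rw [PySem.List.enumerate_cons]
    have h2 : ((n : Int) + 1) = ((n + 1 : Nat) : Int) := by push_cast; ring
    have hm : PySem.Int.mod (n : Int) 2 = ((n % 2 : Nat) : Int) := by
      exact_mod_cast PySem.Int.mod_natCast n 2
    by_cases hp : n % 2 = r
    · have hc : (PySem.Int.mod ((n : Nat) : Int) 2 == ((r : Nat) : Int)) = true := by
        rw [hm]; exact beq_iff_eq.mpr (by exact_mod_cast hp)
      rw [h2, List.filter_cons, if_pos hc, List.map_cons, ih (n + 1)]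
      simp [ev, hp]
    · have hne : ¬ (((n % 2 : Nat) : Int) = (r : Int)) := by exact_mod_cast hp
      have hc : (PySem.Int.mod ((n : Nat) : Int) 2 == ((r : Nat) : Int)) = false := by
        rw [hm]; exact beq_eq_false_iff_ne.mpr hne
      have hcn : ¬ ((PySem.Int.mod ((n : Nat) : Int) 2 == ((r : Nat) : Int)) = true) := by
        rw [hc]; simp
      rw [h2, List.filter_cons, if_neg hcn, ih (n + 1)]
      simp [ev, hp]

theorem solveLoop_yes_or_no (l : List (Int × Char)) (d : PySem.Dict Char Int) :
    solveLoop l d = "YES" ∨ solveLoop l d = "NO" := by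
  induction l generalizing d with
  | nil => left; rfl
  | cons p rest ih =>
    obtain ⟨i, e⟩ := p
    simp only [solveLoop]
    cases h : d.get? e with
    | none => exact ih _
    | some v =>
      simp only []
      by_cases hv : v ≠ PySem.Int.mod i 2
      · rw [if_pos hv]; right; rfl
      · rw [if_neg hv]; exact ih d

theorem loop_no_iff (cs : List Char) : ∀ (n : Nat) (d : PySem.Dict Char Int),
    (∀ c v, d.get? c = some v → v = 0 ∨ v = 1) →
    (solveLoop (PySem.List.enumerate cs (n : Int)) d = "NO" ↔
      ∃ c, (d.get? c = some 0 ∨ c ∈ ev 0 n cs) ∧ (d.get? c = some 1 ∨ c ∈ ev 1 n cs)) := by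
  induction cs with
  | nil =>
    intro n d _
    simp only [PySem.List.enumerate_nil, solveLoop, ev]
    constructor
    · intro h; simp at h
    · rintro ⟨c, h0 | h0, h1 | h1⟩ <;> simp_all
  | cons c cs ih =>
    intro n d hd
    rw [PySem.List.enumerate_cons]
    have h2 : ((n : Int) + 1) = ((n + 1 : Nat) : Int) := by push_cast; ring
    have hm : PySem.Int.mod (n : Int) 2 = ((n % 2 : Nat) : Int) := by
      exact_mod_cast PySem.Int.mod_natCast n 2
    simp only [solveLoop]
    cases hg : d.get? c with
    | none =>
      simp only []
      have hd' : ∀ x v, (d.insert c (PySem.Int.mod (n : Int) 2)).get? x = some v →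
          v = 0 ∨ v = 1 := by
        intro x v hx
        rw [PySem.Dict.get?_insert] at hx
        by_cases hxc : x = c
        · simp [hxc] at hx
          omega
        · exact hd x v (by simpa [hxc] using hx)
      rw [h2, ih (n + 1) _ hd']
      apply exists_congr
      intro x
      by_cases hxc : x = c
      · subst hxc
        rcases Nat.mod_two_eq_zero_or_one n with hp | hp
        · have hp1 : (n + 1) % 2 = 1 := by omega
          simp [hp, ev, hg]
          simp [show (2 : Int) ∣ (n : Int) from by omega,
            show ¬ (((n : Nat) : Int) % 2 = 1) from by omega]
        · have hp1 : (n + 1) % 2 = 0 := by omega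
          simp [hp, ev, hg]
          simp [show ¬ ((2 : Int) ∣ (n : Int)) from by omega,
            show (((n : Nat) : Int) % 2 = 1) from by omega]
      · rcases Nat.mod_two_eq_zero_or_one n with hp | hp <;>
          simp [PySem.Dict.get?_insert, ev, *]
    | some v =>
      simp only []
      rcases Nat.mod_two_eq_zero_or_one n with hp | hp
      · by_cases hv : v = 0
        · subst hv
          have : ¬ ((0 : Int) ≠ PySem.Int.mod (n : Int) 2) := by rw [hm, hp]; decide
          rw [if_neg this, h2, ih (n + 1) d hd]
          apply exists_congr
          intro x
          by_cases hxc : x = c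
          · subst hxc
            have hp1 : (n + 1) % 2 = 1 := by omega
            simp [ev, hp, hg]
          · simp [hxc, ev, hp]
        · have hv1 : v = 1 := by rcases hd c v hg with h | h <;> omega
          subst hv1
          have : (1 : Int) ≠ PySem.Int.mod (n : Int) 2 := by rw [hm, hp]; decide
          rw [if_pos this]
          simp only [true_iff]
          exact ⟨c, Or.inr (by simp [ev, hp]), Or.inl hg⟩
      · by_cases hv : v = 1
        · subst hv
          have : ¬ ((1 : Int) ≠ PySem.Int.mod (n : Int) 2) := by rw [hm, hp]; decide
          rw [if_neg this, h2, ih (n + 1) d hd]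
          apply exists_congr
          intro x
          by_cases hxc : x = c
          · subst hxc
            have hp1 : (n + 1) % 2 = 0 := by omega
            simp [ev, hp, hg]
          · simp [hxc, ev, hp]
        · have hv0 : v = 0 := by rcases hd c v hg with h | h <;> omega
          subst hv0
          have : (0 : Int) ≠ PySem.Int.mod (n : Int) 2 := by rw [hm, hp]; decide
          rw [if_pos this]
          simp only [true_iff]
          exact ⟨c, Or.inl hg, Or.inr (by simp [ev, hp])⟩

theorem solve_no_iff (s : String) :
    solve s = "NO" ↔ ∃ c, c ∈ ev 0 0 s.toList ∧ c ∈ ev 1 0 s.toList := by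
  unfold solve
  have h0 : ((0 : Nat) : Int) = (0 : Int) := rfl
  rw [← h0, loop_no_iff s.toList 0 PySem.Dict.empty (by intro c v h; simp at h)]
  simp

theorem solve_alt_no_iff (s : String) :
    solve_alt s = "NO" ↔ ∃ c, c ∈ ev 0 0 s.toList ∧ c ∈ ev 1 0 s.toList := by
  have f0 : evensOf s = PySem.Set.ofList (ev 0 0 s.toList) := by
    unfold evensOf; rw [show (0 : Int) = ((0 : Nat) : Int) from rfl, filt_eq_ev 0]
  have f1 : oddsOf s = PySem.Set.ofList (ev 1 0 s.toList) := by
    unfold oddsOf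
    rw [show (1 : Int) = ((1 : Nat) : Int) from rfl,
      show (0 : Int) = ((0 : Nat) : Int) from rfl, filt_eq_ev 1]
  unfold solve_alt
  rw [f0, f1]
  split_ifs with h
  · simp only [List.eq_nil_iff_forall_not_mem] at h
    constructor
    · intro hc; simp at hc
    · rintro ⟨c, h0, h1⟩
      exact absurd (by
        rw [PySem.Set.mem_inter, PySem.Set.mem_ofList, PySem.Set.mem_ofList]
        exact ⟨h0, h1⟩) (h c)
  · refine iff_of_true rfl ?_
    obtain ⟨c, hc⟩ := List.exists_mem_of_ne_nil _ h
    rw [PySem.Set.mem_inter, PySem.Set.mem_ofList, PySem.Set.mem_ofList] at hc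
    exact ⟨c, hc⟩

theorem solve_alt_yes_or_no (s : String) :
    solve_alt s = "YES" ∨ solve_alt s = "NO" := by
  unfold solve_alt; split_ifs <;> simp

-- ===== VERDICT (by name: the statement is the Claim_ definition above) =====
theorem solve_spec : Claim_equal_solve := by
  intro s _
  unfold Spec_solve
  by_cases h : ∃ c, c ∈ ev 0 0 s.toList ∧ c ∈ ev 1 0 s.toList
  · rw [(solve_no_iff s).mpr h, (solve_alt_no_iff s).mpr h]
  · have ha : solve s = "YES" := by
      rcases solveLoop_yes_or_no (PySem.List.enumerate s.toList 0) PySem.Dict.empty with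
        hy | hn
      · exact hy
      · exact absurd ((solve_no_iff s).mp hn) h
    have hb : solve_alt s = "YES" := by
      rcases solve_alt_yes_or_no s with hy | hn
      · exact hy
      · exact absurd ((solve_alt_no_iff s).mp hn) h
    rw [ha, hb]
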